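-- pv_equiv track=rewrite | github.com/Jazende/AdventOfCode | aoc19/aoc_19_04_flex_rec.py | recursion_gen_any_digits
-- ===== SOURCE A (Python) =====
-- def recursion_gen_any_digits(cur=None, min_len=None, max_len=None):
--     min_len = 6 if min_len is None else min_len
--     max_len = 6 if max_len is None else max_len
--     cur = 0 if cur is None else cur
--
--     last_digit = max(cur%10, 1)
--
--     if not len(str(cur)) == max_len:
--         if not min_len == max_len and len(str(cur)) >= min_len:
--             yield cur
--
--         for dig in range(last_digit, 10):
--             yield from recursion_gen_any_digits(cur*10+dig, min_len=min_len, max_len=max_len)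
--
--     else:
--         yield cur
-- ===== SOURCE B (Python) =====
-- def recursion_gen_any_digits(cur=None, min_len=None, max_len=None):
--     min_len = 6 if min_len is None else min_len
--     max_len = 6 if max_len is None else max_len
--     stack = [0 if cur is None else cur]
--     while stack:
--         node = stack.pop()
--         if len(str(node)) == max_len:
--             yield node
--         else:
--             if min_len != max_len and len(str(node)) >= min_len:
--                 yield node
--             last = max(node % 10, 1)
--             for dig in range(9, last - 1, -1):
--                 stack.append(node * 10 + dig)
-- ===== Notes on version B (the rewrite author's own statement) =====
-- stated objective: alternative
-- what changed: Replaced A's recursive generator by an iterative DFS over an explicit stack (children pushed largest-first so the smallest is popped next), yielding the same pre-order sequence without Python-level recursion.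
-- outside the precondition, e.g. on recursion_gen_any_digits(-5, None, 3): A returns [-45, -44, -43, -42, -41], B returns [-45, -44, -43, -42, -41]
import Mathlib
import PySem

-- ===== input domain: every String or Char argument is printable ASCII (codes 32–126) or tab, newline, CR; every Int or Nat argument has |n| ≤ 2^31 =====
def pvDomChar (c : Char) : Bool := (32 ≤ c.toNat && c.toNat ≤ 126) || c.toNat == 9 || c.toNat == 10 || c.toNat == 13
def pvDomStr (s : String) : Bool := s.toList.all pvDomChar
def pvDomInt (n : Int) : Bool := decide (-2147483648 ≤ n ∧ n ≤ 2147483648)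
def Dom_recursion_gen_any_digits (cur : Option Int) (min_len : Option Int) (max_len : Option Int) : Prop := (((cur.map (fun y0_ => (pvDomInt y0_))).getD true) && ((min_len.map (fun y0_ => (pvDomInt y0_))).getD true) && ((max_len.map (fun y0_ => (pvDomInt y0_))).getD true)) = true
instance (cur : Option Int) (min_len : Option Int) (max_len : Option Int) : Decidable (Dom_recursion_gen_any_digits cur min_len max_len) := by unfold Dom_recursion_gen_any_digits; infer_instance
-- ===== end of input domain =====

-- B replaces A's recursive generator by an iterative DFS driven by an explicit stack (children pushed
-- largest-first so the smallest is popped next), emitting the same sequence of yields in the same order.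

-- ===== PORT A =====

-- len(str(n))
def pvLenStr (n : Int) : Int := PySem.Str.len (PySem.Int.toStr n)

-- the recursion of A after the defaults are applied; `fuel` is only a termination guard
-- (the Python recursion is unbounded; on Pre_ inputs the fuel chosen below is never exhausted)
def pvRecA (fuel : Nat) (m M cur : Int) : List Int :=
  match fuel with
  | 0 => []
  | fuel + 1 =>
    let last_digit := max (PySem.Int.mod cur 10) 1
    if ¬ pvLenStr cur = M then
      (if ¬ m = M ∧ m ≤ pvLenStr cur then [cur] else []) ++
      (PySem.List.pyRange last_digit 10 1).foldl
        (fun acc dig => acc ++ pvRecA fuel m M (cur * 10 + dig)) []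
    else
      [cur]

def recursion_gen_any_digits (cur : Option Int) (min_len : Option Int) (max_len : Option Int) : List Int :=
  let m := min_len.getD 6
  let M := max_len.getD 6
  let c := cur.getD 0
  pvRecA ((M - 1).toNat + 3) m M c

-- ===== PORT B =====

-- the while-stack loop of B; the Lean list's head is the stack's top, so Source B's
-- "push range(9, last-1, -1) at the end, pop from the end" is "prepend pyRange last 10 in order" here.
-- `fuel` is only a termination guard, never exhausted on Pre_ inputs.
def pvStepB (fuel : Nat) (m M : Int) (stack out : List Int) : List Int :=
  match fuel, stack with
  | _, [] => out
  | 0, _ :: _ => out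
  | fuel + 1, node :: rest =>
    if pvLenStr node = M then
      pvStepB fuel m M rest (out ++ [node])
    else
      let out' := if ¬ m = M ∧ m ≤ pvLenStr node then out ++ [node] else out
      let last := max (PySem.Int.mod node 10) 1
      pvStepB fuel m M ((PySem.List.pyRange last 10 1).map (fun dig => node * 10 + dig) ++ rest) out'

def recursion_gen_any_digits_alt (cur : Option Int) (min_len : Option Int) (max_len : Option Int) : List Int :=
  let m := min_len.getD 6
  let M := max_len.getD 6
  let c := cur.getD 0
  pvStepB (10 ^ ((M - 1).toNat + 3)) m M [c] []

-- ===== PRECONDITION & SPEC =====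

-- Pre_ excludes inputs where the Python generator never terminates (len(str(cur)) can never reach
-- max_len, e.g. max_len < len(str(cur)), or cur = -1), and with them all negative cur that are not
-- already at max_len: A recurses through negative numbers there, diverging on some of them, and the
-- function's natural domain (digit strings) is nonnegative.
def Pre_recursion_gen_any_digits (cur : Option Int) (min_len : Option Int) (max_len : Option Int) : Prop :=
  (0 ≤ cur.getD 0 ∧ pvLenStr (cur.getD 0) ≤ max_len.getD 6) ∨ pvLenStr (cur.getD 0) = max_len.getD 6
instance (cur : Option Int) (min_len : Option Int) (max_len : Option Int) : Decidable (Pre_recursion_gen_any_digits cur min_len max_len) := by unfold Pre_recursion_gen_any_digits; infer_instance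

def pvWitness_recursion_gen_any_digits : Option Int × Option Int × Option Int := (some 1, some 1, some 3)

def Spec_recursion_gen_any_digits (cur : Option Int) (min_len : Option Int) (max_len : Option Int) (out : List Int) : Prop := out = recursion_gen_any_digits_alt cur min_len max_len
instance (cur : Option Int) (min_len : Option Int) (max_len : Option Int) (out : List Int) : Decidable (Spec_recursion_gen_any_digits cur min_len max_len out) := by unfold Spec_recursion_gen_any_digits; infer_instance

-- ===== CLAIM (what is proved, stated in full; the proofs are below) =====
def Claim_equal_recursion_gen_any_digits : Prop := ∀ (cur : Option Int) (min_len : Option Int) (max_len : Option Int), Dom_recursion_gen_any_digits cur min_len max_len → Pre_recursion_gen_any_digits cur min_len max_len → Spec_recursion_gen_any_digits cur min_len max_len (recursion_gen_any_digits cur min_len max_len)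

-- ===== LEMMAS AND PROOFS =====

-- length of Nat.toDigitsCore, given enough fuel
theorem pvTDCLen : ∀ (f : Nat), ∀ (n : Nat) (l : List Char), 0 < f → n < 10 ^ f →
    (Nat.toDigitsCore 10 f n l).length = Nat.log 10 n + 1 + l.length := by
  intro f
  induction f with
  | zero => intro n l h; omega
  | succ f ih =>
    intro n l _ hlt
    by_cases h : n / 10 = 0
    · have hn : n < 10 := by omega
      simp [Nat.toDigitsCore, h, Nat.log_of_lt hn]
      omega
    · have hstep : Nat.toDigitsCore 10 (f+1) n l
          = Nat.toDigitsCore 10 f (n / 10) (Nat.digitChar (n % 10) :: l) := by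
        simp [Nat.toDigitsCore, h]
      have hb : 10 ≤ n := by omega
      have hf : 0 < f := by
        by_contra hf0
        have : f = 0 := by omega
        subst this; simp at hlt; omega
      have hlt' : n / 10 < 10 ^ f :=
        (Nat.div_lt_iff_lt_mul (by norm_num)).mpr (by rw [pow_succ] at hlt; omega)
      have hlog : Nat.log 10 (n / 10) = Nat.log 10 n - 1 := Nat.log_div_base 10 n
      have hpos : 0 < Nat.log 10 n := Nat.log_pos (by norm_num) hb
      rw [hstep, ih (n / 10) _ hf hlt']
      simp [hlog]
      omega

theorem pvLenStr_nonneg (n : Int) (h : 0 ≤ n) : pvLenStr n = (Nat.log 10 n.toNat : Int) + 1 := by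
  have hneg : ¬ n < 0 := by omega
  have hlt : n.toNat < 10 ^ (n.toNat + 1) := by
    calc n.toNat < 2 ^ (n.toNat + 1) := Nat.lt_two_pow_self.trans (Nat.pow_lt_pow_right (by norm_num) (by omega))
    _ ≤ 10 ^ (n.toNat + 1) := Nat.pow_le_pow_left (by norm_num) _
  simp only [pvLenStr, PySem.Str.len, PySem.Int.toStr, PySem.Int.toChars, hneg, if_false,
    String.toList_ofList]
  rw [show Nat.toDigits 10 n.toNat = Nat.toDigitsCore 10 (n.toNat + 1) n.toNat [] from rfl]
  rw [pvTDCLen (n.toNat + 1) n.toNat [] (by omega) hlt]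
  simp

theorem pvLenStr_small (d : Int) (h0 : 0 ≤ d) (h9 : d < 10) : pvLenStr d = 1 := by
  rw [pvLenStr_nonneg d h0]
  have : d.toNat < 10 := by omega
  rw [Nat.log_of_lt this]
  simp

theorem pvLenStr_pos (n : Int) (h : 0 ≤ n) : 1 ≤ pvLenStr n := by
  rw [pvLenStr_nonneg n h]; omega

theorem pvLenStr_step (n d : Int) (hn : 1 ≤ n) (h0 : 0 ≤ d) (h9 : d < 10) :
    pvLenStr (n * 10 + d) = pvLenStr n + 1 := by
  rw [pvLenStr_nonneg n (by omega), pvLenStr_nonneg (n * 10 + d) (by nlinarith)]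
  have htn : (n * 10 + d).toNat = n.toNat * 10 + d.toNat := by omega
  rw [htn]
  have hdiv : (n.toNat * 10 + d.toNat) / 10 = n.toNat := by omega
  have hge : 10 ≤ n.toNat * 10 + d.toNat := by omega
  have hlog := Nat.log_div_base 10 (n.toNat * 10 + d.toNat)
  rw [hdiv] at hlog
  have hpos : 0 < Nat.log 10 (n.toNat * 10 + d.toNat) := Nat.log_pos (by norm_num) hge
  omega

theorem pvMod10 (a : Int) : 0 ≤ PySem.Int.mod a 10 ∧ PySem.Int.mod a 10 < 10 := by
  have h : PySem.Int.mod a 10 = a % 10 := by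
    simp only [PySem.Int.mod]; rw [Int.fmod_eq_emod] <;> norm_num
  rw [h]
  exact ⟨Int.emod_nonneg a (by norm_num), Int.emod_lt_of_pos a (by norm_num)⟩

-- fuel needed by the recursion from `cur`
def pvNeed (M cur : Int) : Nat := (M - pvLenStr cur).toNat + (if cur = 0 then 2 else 1)

-- number of loop iterations (= tree nodes) the stack machine spends on the subtree of `cur`
def pvCnt (f : Nat) (M cur : Int) : Nat :=
  match f with
  | 0 => 1
  | f + 1 =>
    if pvLenStr cur = M then 1
    else ((PySem.List.pyRange (max (PySem.Int.mod cur 10) 1) 10 1).map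
            (fun d => pvCnt f M (cur * 10 + d))).sum + 1

theorem pvCnt_le (f : Nat) (M cur : Int) : pvCnt f M cur ≤ 10 ^ f := by
  induction f generalizing cur with
  | zero => simp [pvCnt]
  | succ f ih =>
    rw [pvCnt]
    split
    · exact Nat.one_le_pow _ _ (by norm_num)
    · have hlen : (PySem.List.pyRange (max (PySem.Int.mod cur 10) 1) 10 1).length ≤ 9 := by
        rw [PySem.List.length_pyRange_one]
        have := (pvMod10 cur).1
        omega
      have hsum : ((PySem.List.pyRange (max (PySem.Int.mod cur 10) 1) 10 1).map
            (fun d => pvCnt f M (cur * 10 + d))).sum ≤ 9 * 10 ^ f := by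
        calc ((PySem.List.pyRange (max (PySem.Int.mod cur 10) 1) 10 1).map
              (fun d => pvCnt f M (cur * 10 + d))).sum
            ≤ ((PySem.List.pyRange (max (PySem.Int.mod cur 10) 1) 10 1).map
              (fun d => pvCnt f M (cur * 10 + d))).length • (10 ^ f) := by
              apply List.sum_le_card_nsmul
              intro x hx
              obtain ⟨d, _, rfl⟩ := List.mem_map.mp hx
              exact ih _
          _ ≤ 9 * 10 ^ f := by
              rw [List.length_map, smul_eq_mul]
              exact Nat.mul_le_mul_right _ hlen
      have h1 : 10 ^ (f + 1) = 10 * 10 ^ f := by ring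
      have h2 : 1 ≤ 10 ^ f := Nat.one_le_pow _ _ (by norm_num)
      omega

-- child bookkeeping: each pushed child keeps the invariant with one unit less fuel
theorem pvChildConds (M cur d : Int) (h0 : 0 ≤ cur) (hle : pvLenStr cur ≤ M)
    (hne : ¬ pvLenStr cur = M) (f : Nat) (hf : pvNeed M cur ≤ f + 1)
    (hd1 : max (PySem.Int.mod cur 10) 1 ≤ d) (hd9 : d < 10) :
    0 ≤ cur * 10 + d ∧ pvLenStr (cur * 10 + d) ≤ M ∧ pvNeed M (cur * 10 + d) ≤ f := by
  have hd1' : 1 ≤ d := le_trans (le_max_right _ _) hd1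
  by_cases hz : cur = 0
  · subst hz
    have h1 : pvLenStr (0 * 10 + d) = 1 := by
      rw [show (0 : Int) * 10 + d = d by ring]; exact pvLenStr_small d (by omega) hd9
    have h0' : pvLenStr 0 = 1 := pvLenStr_small 0 (by norm_num) (by norm_num)
    refine ⟨by omega, by omega, ?_⟩
    rw [pvNeed, h1, if_neg (by omega : ¬ (0:Int) * 10 + d = 0)]
    rw [pvNeed, h0', if_pos rfl] at hf
    omega
  · have hcur1 : 1 ≤ cur := by omega
    have hstep := pvLenStr_step cur d hcur1 (by omega) hd9
    have hlt : pvLenStr cur < M := by omega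
    refine ⟨by nlinarith, by omega, ?_⟩
    rw [pvNeed, hstep, if_neg (by nlinarith : ¬ cur * 10 + d = 0)]
    rw [pvNeed, if_neg hz] at hf
    omega

-- unfolding of A's recursion at an interior node
theorem pvRecA_interior (f : Nat) (m M cur : Int) (h : ¬ pvLenStr cur = M) :
    pvRecA (f + 1) m M cur
      = (if ¬ m = M ∧ m ≤ pvLenStr cur then [cur] else []) ++
        (PySem.List.pyRange (max (PySem.Int.mod cur 10) 1) 10 1).flatMap
          (fun d => pvRecA f m M (cur * 10 + d)) := by
  rw [pvRecA, if_pos h, PySem.List.foldl_append_eq_flatMap, List.nil_append]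

-- the main invariant: the stack machine, run on a stack of valid roots, appends exactly the
-- concatenation of their recursive outputs, spending exactly the node count of fuel
theorem pvBridge : ∀ (f : Nat) (m M : Int) (xs rest out : List Int) (g : Nat),
    (∀ x ∈ xs, 0 ≤ x ∧ pvLenStr x ≤ M ∧ pvNeed M x ≤ f) →
    pvStepB ((xs.map (pvCnt f M)).sum + g) m M (xs ++ rest) out
      = pvStepB g m M rest (out ++ xs.flatMap (pvRecA f m M)) := by
  intro f
  induction f with
  | zero =>
    intro m M xs rest out g h
    cases xs with
    | nil => simp
    | cons x xs =>
      have := (h x (by simp)).2.2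
      rw [pvNeed] at this
      split at this <;> omega
  | succ f ihf =>
    intro m M xs rest out g h
    induction xs generalizing rest out g with
    | nil => simp
    | cons x xs ihxs =>
      have hx := h x (by simp)
      by_cases hleaf : pvLenStr x = M
      · -- leaf: one iteration pops x and emits it
        have hcnt : pvCnt (f+1) M x = 1 := by rw [pvCnt, if_pos hleaf]
        have hfuel : ((x :: xs).map (pvCnt (f+1) M)).sum + g
            = ((xs.map (pvCnt (f+1) M)).sum + g) + 1 := by simp [hcnt]; omega
        rw [hfuel]
        rw [show ((x :: xs) ++ rest) = x :: (xs ++ rest) from rfl]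
        rw [pvStepB, if_pos hleaf]
        rw [ihxs rest (out ++ [x]) g (fun y hy => h y (by simp [hy]))]
        have hrec : pvRecA (f+1) m M x = [x] := by rw [pvRecA, if_neg (by simp [hleaf])]
        simp [hrec]
      · -- interior node: one iteration pops x, maybe emits it, pushes its children
        have hcnt : pvCnt (f + 1) M x
            = ((PySem.List.pyRange (max (PySem.Int.mod x 10) 1) 10 1).map
                (fun d => pvCnt f M (x * 10 + d))).sum + 1 := by
          rw [pvCnt, if_neg hleaf]
        have hchild : ∀ y ∈ (PySem.List.pyRange (max (PySem.Int.mod x 10) 1) 10 1).map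
              (fun dig => x * 10 + dig), 0 ≤ y ∧ pvLenStr y ≤ M ∧ pvNeed M y ≤ f := by
          intro y hy
          obtain ⟨d, hd, rfl⟩ := List.mem_map.mp hy
          obtain ⟨hd1, hd9⟩ := PySem.List.mem_pyRange_one.mp hd
          exact pvChildConds M x d hx.1 hx.2.1 hleaf f hx.2.2 hd1 hd9
        have hfuel : ((x :: xs).map (pvCnt (f+1) M)).sum + g
            = ((((PySem.List.pyRange (max (PySem.Int.mod x 10) 1) 10 1).map
                  (fun dig => x * 10 + dig)).map (pvCnt f M)).sum
               + ((xs.map (pvCnt (f+1) M)).sum + g)) + 1 := by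
          simp only [List.map_cons, List.sum_cons, hcnt, List.map_map, Function.comp_def]
          omega
        rw [hfuel]
        rw [show ((x :: xs) ++ rest) = x :: (xs ++ rest) from rfl]
        rw [pvStepB, if_neg hleaf]
        show pvStepB ((((PySem.List.pyRange (max (PySem.Int.mod x 10) 1) 10 1).map
                  (fun dig => x * 10 + dig)).map (pvCnt f M)).sum
               + ((xs.map (pvCnt (f+1) M)).sum + g)) m M
              (((PySem.List.pyRange (max (PySem.Int.mod x 10) 1) 10 1).map
                  (fun dig => x * 10 + dig)) ++ (xs ++ rest))
              (if ¬ m = M ∧ m ≤ pvLenStr x then out ++ [x] else out)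
            = pvStepB g m M rest (out ++ (x :: xs).flatMap (pvRecA (f+1) m M))
        rw [ihf m M ((PySem.List.pyRange (max (PySem.Int.mod x 10) 1) 10 1).map
              (fun dig => x * 10 + dig)) (xs ++ rest) _ _ hchild]
        rw [ihxs rest _ g (fun y hy => h y (by simp [hy]))]
        rw [List.flatMap_cons, pvRecA_interior f m M x hleaf, List.flatMap_map]
        by_cases hP : ¬ m = M ∧ m ≤ pvLenStr x <;>
          simp [hP, List.append_assoc, Function.comp_def]
-- ===== VERDICT (by name: the statement is the Claim_ definition above) =====
theorem recursion_gen_any_digits_spec : Claim_equal_recursion_gen_any_digits := by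
  intro cur min_len max_len _ hpre
  unfold Spec_recursion_gen_any_digits
  show pvRecA ((max_len.getD 6 - 1).toNat + 3) (min_len.getD 6) (max_len.getD 6) (cur.getD 0)
      = pvStepB (10 ^ ((max_len.getD 6 - 1).toNat + 3)) (min_len.getD 6) (max_len.getD 6)
          [cur.getD 0] []
  set m := min_len.getD 6
  set M := max_len.getD 6
  set c := cur.getD 0 with hc
  set F := (M - 1).toNat + 3 with hF
  rcases hpre with ⟨hc0, hcle⟩ | hleaf
  · -- main case: nonnegative cur whose length can still reach max_len
    have hlen1 : 1 ≤ pvLenStr c := pvLenStr_pos c hc0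
    have hneed : pvNeed M c ≤ F := by
      rw [pvNeed]; split <;> omega
    have hcntle : pvCnt F M c ≤ 10 ^ F := pvCnt_le F M c
    have hb := pvBridge F m M [c] [] [] (10 ^ F - pvCnt F M c)
      (by intro x hx; simp at hx; subst hx; exact ⟨hc0, hcle, hneed⟩)
    simp at hb
    rw [show (10:Nat) ^ F = pvCnt F M c + (10 ^ F - pvCnt F M c) by omega]
    rw [hb]
    cases h10 : 10 ^ F - pvCnt F M c <;> simp [pvStepB]
  · -- leaf case: cur is already exactly max_len digits long (any sign)
    have hl : pvLenStr c = M := hleaf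
    obtain ⟨F', hF'⟩ : ∃ F', F = F' + 1 := ⟨(M - 1).toNat + 2, by omega⟩
    obtain ⟨k, hk⟩ : ∃ k, 10 ^ F = k + 1 := ⟨10 ^ F - 1, by
      have hp : 0 < 10 ^ F := by positivity
      omega⟩
    rw [hF'] at hk
    rw [hF', hk]
    rw [pvRecA, if_neg (by simp [hl])]
    rw [pvStepB, if_pos hl]
    cases k <;> simp [pvStepB]
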